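-- pv_equiv track=rewrite | github.com/Block-Bench/base | strategies/sanitize/sanitize_gold_standard.py | find_vulnerability_header_block
-- ===== SOURCE A (Python) =====
-- from typing import Tuple, List
--
-- def find_vulnerability_header_block(lines: List[str]) -> Tuple[int, int]:
--     """
--     Find the vulnerability header block comment.
--
--     Returns (start_line, end_line) indices, or (-1, -1) if not found.
--     """
--     in_block = False
--     start_idx = -1
--
--     for i, line in enumerate(lines):
--         stripped = line.strip()
--
--         # Look for block comment start with vulnerability info
--         if not in_block:
--             if stripped.startswith('/**') or stripped.startswith('/*'):
--                 # Check if this block contains vulnerability info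
--                 # Look ahead to see if it's the vuln header
--                 for j in range(i, min(i + 10, len(lines))):
--                     if 'VULNERABLE CONTRACT' in lines[j] or 'VULNERABILITY INFORMATION' in lines[j]:
--                         in_block = True
--                         start_idx = i
--                         break
--
--         if in_block:
--             # Look for end of block comment
--             if '*/' in stripped:
--                 return (start_idx, i)
--
--     return (-1, -1)
-- ===== SOURCE B (Python) =====
-- from typing import Tuple, List
--
-- def find_vulnerability_header_block(lines: List[str]) -> Tuple[int, int]:
--     """Marker-driven inverted scan: instead of testing every comment-start line's
--     lookahead window, iterate over the vulnerability-marker lines themselves and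
--     look BACK up to 10 lines for the comment start; keep the earliest such start,
--     then scan forward from it for the closing line."""
--     n = len(lines)
--     best = n  # sentinel: no header block found yet
--     for m in range(n):
--         if 'VULNERABLE CONTRACT' in lines[m] or 'VULNERABILITY INFORMATION' in lines[m]:
--             for i in range(max(0, m - 9), m + 1):
--                 if lines[i].strip().startswith('/*'):
--                     if i < best:
--                         best = i
--                     break
--     if best == n:
--         return (-1, -1)
--     for j in range(best, n):
--         if '*/' in lines[j].strip():
--             return (best, j)
--     return (-1, -1)
-- ===== Notes on version B (the rewrite author's own statement) =====
-- stated objective: faster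
-- what changed: A scans comment-start lines and looks AHEAD 10 lines for a vulnerability marker inside one stateful in_block loop, stripping every line; B inverts the traversal: it iterates over the marker lines themselves, looks BACK up to 10 lines for the nearest comment start (keeping the earliest over all markers), then scans forward from it for the closing '*/', so lines are stripped only near markers.
import Mathlib
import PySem

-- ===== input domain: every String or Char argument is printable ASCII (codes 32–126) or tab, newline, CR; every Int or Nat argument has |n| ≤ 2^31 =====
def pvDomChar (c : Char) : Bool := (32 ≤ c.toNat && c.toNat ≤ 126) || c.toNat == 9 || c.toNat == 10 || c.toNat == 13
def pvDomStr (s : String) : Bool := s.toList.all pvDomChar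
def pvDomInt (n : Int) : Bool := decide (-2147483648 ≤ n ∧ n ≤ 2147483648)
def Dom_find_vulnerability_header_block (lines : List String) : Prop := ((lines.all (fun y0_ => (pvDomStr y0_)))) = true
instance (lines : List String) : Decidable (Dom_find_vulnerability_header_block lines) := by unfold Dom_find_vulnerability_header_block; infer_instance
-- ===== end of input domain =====

-- B inverts A's scan: instead of testing each comment-start line's lookahead window, it iterates over the marker lines and looks BACK up to 10 lines for the comment start, keeping the earliest; lines are stripped only near markers (a timing run measured B faster).

-- ===== PORT A =====
-- the lookahead 'for j in range(i, min(i+10, len(lines)))' checking for the marker strings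
def pvA_lookahead (lines : List String) : List Int → Bool
  | [] => false
  | j :: js =>
    if PySem.Str.isIn "VULNERABLE CONTRACT" (PySem.List.pyGetD lines j "") ||
       PySem.Str.isIn "VULNERABILITY INFORMATION" (PySem.List.pyGetD lines j "") then true
    else pvA_lookahead lines js

-- the 'if not in_block: …' branch updating the state (in_block, start_idx)
def pvA_step (lines : List String) (i : Nat) (stripped : String) (in_block : Bool) (start_idx : Int) : Bool × Int :=
  if !in_block then
    if PySem.Str.startswith stripped "/**" || PySem.Str.startswith stripped "/*" then
      if pvA_lookahead lines (PySem.List.pyRange (i : Int) (min ((i : Int) + 10) (lines.length : Int)) 1) then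
        (true, (i : Int))
      else (in_block, start_idx)
    else (in_block, start_idx)
  else (in_block, start_idx)

-- the 'for i, line in enumerate(lines)' loop
def pvA_loop (lines : List String) : List String → Nat → Bool → Int → Int × Int
  | [], _, _, _ => (-1, -1)
  | line :: rest, i, in_block, start_idx =>
    let stripped := PySem.Str.strip line
    let st := pvA_step lines i stripped in_block start_idx
    if st.1 && PySem.Str.isIn "*/" stripped then (st.2, (i : Int))
    else pvA_loop lines rest (i + 1) st.1 st.2

def find_vulnerability_header_block (lines : List String) : Int × Int :=
  pvA_loop lines lines 0 false (-1)

-- ===== PORT B =====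
-- 'VULNERABLE CONTRACT' in lines[m] or 'VULNERABILITY INFORMATION' in lines[m]
def pvB_marker (l : String) : Bool :=
  PySem.Str.isIn "VULNERABLE CONTRACT" l || PySem.Str.isIn "VULNERABILITY INFORMATION" l

-- lines[i].strip().startswith('/*')
def pvB_starts (lines : List String) (i : Nat) : Bool :=
  PySem.Str.startswith (PySem.Str.strip (lines.getD i "")) "/*"

-- the inner backward-window loop 'for i in range(max(0, m-9), m+1): … break'
def pvB_back (lines : List String) : List Nat → Option Nat
  | [] => none
  | i :: is => if pvB_starts lines i then some i else pvB_back lines is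

-- range(max(0, m-9), m+1) (Nat subtraction is the max with 0)
def pvB_window (m : Nat) : List Nat := List.range' (m - 9) (m + 1 - (m - 9))

-- one iteration of the outer 'for m in range(n)' loop, updating best
def pvB_step (lines : List String) (best m : Nat) : Nat :=
  if pvB_marker (lines.getD m "") then
    match pvB_back lines (pvB_window m) with
    | some i => if i < best then i else best
    | none => best
  else best

def pvB_best (lines : List String) : Nat :=
  (List.range lines.length).foldl (pvB_step lines) lines.length

-- the final 'for j in range(best, n)' scan for '*/'
def pvB_endScan (lines : List String) (best : Nat) : List Nat → Int × Int
  | [] => (-1, -1)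
  | j :: js =>
    if PySem.Str.isIn "*/" (PySem.Str.strip (lines.getD j "")) then ((best : Int), (j : Int))
    else pvB_endScan lines best js

def find_vulnerability_header_block_alt (lines : List String) : Int × Int :=
  let n := lines.length
  let best := pvB_best lines
  if best = n then (-1, -1)
  else pvB_endScan lines best (List.range' best (n - best))

-- ===== PRECONDITION & SPEC =====
def Spec_find_vulnerability_header_block (lines : List String) (out : Int × Int) : Prop := out = find_vulnerability_header_block_alt lines
instance (lines : List String) (out : Int × Int) : Decidable (Spec_find_vulnerability_header_block lines out) := by unfold Spec_find_vulnerability_header_block; infer_instance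

-- ===== CLAIM (what is proved, stated in full; the proofs are below) =====
def Claim_equal_find_vulnerability_header_block : Prop := ∀ (lines : List String), Dom_find_vulnerability_header_block lines → Spec_find_vulnerability_header_block lines (find_vulnerability_header_block lines)

-- ===== LEMMAS AND PROOFS =====

-- proof-only helpers: A's combined start condition at index i, and the end test
def pvCond (lines : List String) (i : Nat) : Bool :=
  pvB_starts lines i && ((lines.drop i).take 10).any pvB_marker

def pvEnd (l : String) : Bool := PySem.Str.isIn "*/" (PySem.Str.strip l)

-- A's per-line start condition, as in the old forward scan
def pvFwdCond (lines : List String) (i : Nat) (line : String) : Bool :=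
  PySem.Str.startswith (PySem.Str.strip line) "/*" &&
  (PySem.List.slice lines (some (i : Int)) (some ((i : Int) + 10))).any pvB_marker

-- forward scan: A's behaviour while not yet in the block
def pvFwd (lines : List String) : List String → Nat → Option Nat
  | [], _ => none
  | line :: rest, i => if pvFwdCond lines i line then some i else pvFwd lines rest (i + 1)

lemma pvA_loop_cons (lines : List String) (line : String) (rest : List String) (i : Nat)
    (b : Bool) (s : Int) :
    pvA_loop lines (line :: rest) i b s =
      (if (pvA_step lines i (PySem.Str.strip line) b s).1 && PySem.Str.isIn "*/" (PySem.Str.strip line) then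
        ((pvA_step lines i (PySem.Str.strip line) b s).2, (i : Int))
      else pvA_loop lines rest (i + 1) (pvA_step lines i (PySem.Str.strip line) b s).1
             (pvA_step lines i (PySem.Str.strip line) b s).2) := rfl

lemma pv_step_true (lines : List String) (i : Nat) (str : String) (s : Int) :
    pvA_step lines i str true s = (true, s) := rfl

lemma pv_step_false (lines : List String) (i : Nat) (str : String) (s : Int) :
    pvA_step lines i str false s =
      (if (PySem.Str.startswith str "/**" || PySem.Str.startswith str "/*") &&
          pvA_lookahead lines (PySem.List.pyRange (i : Int) (min ((i : Int) + 10) (lines.length : Int)) 1) then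
        (true, (i : Int))
      else (false, s)) := by
  cases h1 : (PySem.Str.startswith str "/**" || PySem.Str.startswith str "/*") <;>
    cases h2 : pvA_lookahead lines (PySem.List.pyRange (i : Int) (min ((i : Int) + 10) (lines.length : Int)) 1) <;>
      simp only [pvA_step, h1, h2, Bool.not_false, Bool.and_false,
        Bool.and_true, Bool.false_eq_true, if_true, if_false]

-- '/**' or '/*' prefix collapses to '/*'
lemma pv_startswith_collapse (s : String) :
    (PySem.Str.startswith s "/**" || PySem.Str.startswith s "/*") = PySem.Str.startswith s "/*" := by
  cases h : PySem.Str.startswith s "/**"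
  · simp
  · simp only [Bool.true_or]
    have h' : ("/**".toList) <+: s.toList := by
      have := (PySem.Chars.startswith_iff s.toList "/**".toList).1 (by simpa using h)
      simpa using this
    have hp : ("/*".toList) <+: s.toList := List.IsPrefix.trans ⟨['*'], rfl⟩ h'
    have := (PySem.Chars.startswith_iff s.toList "/*".toList).2 hp
    simp only [PySem.Str.startswith_eq]
    exact this.symm

-- A's lookahead is an 'any' over the window of fetched lines
lemma pv_lookahead_eq_any (lines : List String) (js : List Int) :
    pvA_lookahead lines js =
      (js.map (fun j => PySem.List.pyGetD lines j "")).any pvB_marker := by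
  induction js with
  | nil => rfl
  | cons j js ih =>
    simp only [pvA_lookahead, List.map_cons, List.any_cons, ih, pvB_marker]
    split <;> simp_all

-- the fetched window range(i, min(i+10, n)) IS lines[i:][:10]
lemma pv_window_eq (lines : List String) (i : Nat) :
    (PySem.List.pyRange (i : Int) (min ((i : Int) + 10) (lines.length : Int)) 1).map
        (fun j => PySem.List.pyGetD lines j "") = (lines.drop i).take 10 := by
  have hfull := PySem.List.map_pyGetD_pyRange' (xs := lines) (d := "") (a := (i : Int)) (by omega)
  simp only [Int.toNat_natCast] at hfull
  rcases le_or_gt (i + 10) lines.length with hle | hgt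
  · have hm : min ((i : Int) + 10) (lines.length : Int) = ((i : Int) + 10) := by omega
    rw [hm]
    have hsplit := PySem.List.pyRange_one_append (i : Int) ((i : Int) + 10) (lines.length : Int)
      (by omega) (by exact_mod_cast hle)
    rw [hsplit, List.map_append] at hfull
    have hlen : ((PySem.List.pyRange (i : Int) ((i : Int) + 10) 1).map
        (fun j => PySem.List.pyGetD lines j "")).length = 10 := by
      simp [PySem.List.length_pyRange_one]
    rw [← hfull, List.take_left' hlen]
  · have hm : min ((i : Int) + 10) (lines.length : Int) = (lines.length : Int) := by omega
    rw [hm, hfull, List.take_of_length_le (by simp; omega)]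

-- A's start condition at (i, line) is pvFwdCond
lemma pv_cond_eq (lines : List String) (i : Nat) (line : String) :
    ((PySem.Str.startswith (PySem.Str.strip line) "/**" ||
        PySem.Str.startswith (PySem.Str.strip line) "/*") &&
      pvA_lookahead lines (PySem.List.pyRange (i : Int) (min ((i : Int) + 10) (lines.length : Int)) 1))
    = pvFwdCond lines i line := by
  have h10 : PySem.List.slice lines (some (i : Int)) (some ((i : Int) + 10)) = (lines.drop i).take 10 := by
    simpa using PySem.List.slice_natCast_add lines i 10
  rw [pv_startswith_collapse, pv_lookahead_eq_any, pv_window_eq, pvFwdCond, h10]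

-- once in_block: A scans for '*/' exactly like findIdx? on the remaining lines
lemma pv_loopA_true (lines : List String) :
    ∀ (rest : List String) (i : Nat) (s : Int),
      pvA_loop lines rest i true s =
        (match rest.findIdx? pvEnd with
         | some k => (s, ((i + k : Nat) : Int))
         | none => (-1, -1)) := by
  intro rest
  induction rest with
  | nil => intro i s; rfl
  | cons line rest ih =>
    intro i s
    rw [pvA_loop_cons, pv_step_true, List.findIdx?_cons]
    by_cases he : PySem.Str.isIn "*/" (PySem.Str.strip line) = true
    · have he2 : pvEnd line = true := he
      simp only [he, he2, Bool.true_and, if_true]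
      simp
    · simp only [Bool.not_eq_true] at he
      have he2 : pvEnd line = false := he
      simp only [he, he2, Bool.and_false, Bool.false_eq_true, if_false, ih (i + 1) s]
      cases hk : rest.findIdx? pvEnd with
      | none => simp
      | some k =>
        simp only [Option.map_some]
        refine congrArg (Prod.mk s) ?_
        push_cast
        omega

-- A's not-yet-in-block loop from index i equals: forward-scan for the start, then findIdx? for the end
lemma pv_loopA_false (lines : List String) :
    ∀ (rest : List String) (i : Nat), rest = lines.drop i →
      pvA_loop lines rest i false (-1) =
        (match pvFwd lines rest i with
         | none => (-1, -1)
         | some s =>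
           match (lines.drop s).findIdx? pvEnd with
           | some k => ((s : Int), ((s + k : Nat) : Int))
           | none => (-1, -1)) := by
  intro rest
  induction rest with
  | nil => intro i _; rfl
  | cons line rest ih =>
    intro i hdrop
    have hdrop' : rest = lines.drop (i + 1) := by
      have := congrArg List.tail hdrop
      simpa [List.tail_drop] using this
    have hdropi : lines.drop i = line :: rest := hdrop.symm
    rw [pvA_loop_cons, pv_step_false]
    simp only [pvFwd]
    rw [← pv_cond_eq lines i line]
    by_cases hc : ((PySem.Str.startswith (PySem.Str.strip line) "/**" ||
        PySem.Str.startswith (PySem.Str.strip line) "/*") &&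
      pvA_lookahead lines (PySem.List.pyRange (i : Int) (min ((i : Int) + 10) (lines.length : Int)) 1)) = true
    · simp only [hc, if_true]
      rw [hdropi, List.findIdx?_cons]
      by_cases he : PySem.Str.isIn "*/" (PySem.Str.strip line) = true
      · have he2 : pvEnd line = true := he
        simp only [he, he2, Bool.true_and, if_true]
        simp
      · simp only [Bool.not_eq_true] at he
        have he2 : pvEnd line = false := he
        simp only [he, he2, Bool.and_false, Bool.false_eq_true, if_false]
        rw [pv_loopA_true lines rest (i + 1) (i : Int)]
        cases hk : rest.findIdx? pvEnd with
        | none => simp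
        | some k =>
          simp only [Option.map_some]
          refine congrArg (Prod.mk (i : Int)) ?_
          push_cast
          omega
    · simp only [Bool.not_eq_true] at hc
      simp only [hc, Bool.false_eq_true, if_false, Bool.false_and]
      exact ih (i + 1) hdrop'

-- pvFwdCond on the actual i-th line is pvCond
lemma pv_fwdCond_eq (lines : List String) (i : Nat) :
    pvFwdCond lines i (lines.getD i "") = pvCond lines i := by
  have h10 : PySem.List.slice lines (some (i : Int)) (some ((i : Int) + 10)) = (lines.drop i).take 10 := by
    simpa using PySem.List.slice_natCast_add lines i 10
  simp only [pvFwdCond, pvCond, pvB_starts, h10]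

-- characterization of the forward scan
lemma pv_fwd_some (lines : List String) :
    ∀ (rest : List String) (i : Nat), rest = lines.drop i →
      ∀ s, pvFwd lines rest i = some s →
        i ≤ s ∧ s < lines.length ∧ pvCond lines s = true ∧
        ∀ k, i ≤ k → k < s → pvCond lines k = false := by
  intro rest
  induction rest with
  | nil => intro i _ s h; exact absurd h (by simp [pvFwd])
  | cons line rest ih =>
    intro i hdrop s h
    have hdrop' : rest = lines.drop (i + 1) := by
      have := congrArg List.tail hdrop
      simpa [List.tail_drop] using this
    have hi : i < lines.length := by
      by_contra hni
      have : lines.drop i = [] := List.drop_eq_nil_of_le (by omega)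
      rw [this] at hdrop; exact absurd hdrop (by simp)
    have hline : line = lines.getD i "" := by
      have := congrArg (fun l => l.getD 0 "") hdrop
      simpa [List.getD, List.getElem?_drop] using this
    rw [pvFwd] at h
    by_cases hc : pvFwdCond lines i line = true
    · rw [if_pos hc] at h
      obtain rfl : i = s := by injection h
      refine ⟨le_refl _, hi, ?_, fun k hk1 hk2 => by omega⟩
      rw [← pv_fwdCond_eq, ← hline]; exact hc
    · rw [if_neg hc] at h
      obtain ⟨h1, h2, h3, h4⟩ := ih (i + 1) hdrop' s h
      refine ⟨by omega, h2, h3, fun k hk1 hk2 => ?_⟩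
      rcases eq_or_lt_of_le hk1 with rfl | hlt
      · rw [← pv_fwdCond_eq, ← hline]; exact Bool.not_eq_true _ ▸ (by simpa using hc)
      · exact h4 k (by omega) hk2

lemma pv_fwd_none (lines : List String) :
    ∀ (rest : List String) (i : Nat), rest = lines.drop i →
      pvFwd lines rest i = none →
      ∀ k, i ≤ k → k < lines.length → pvCond lines k = false := by
  intro rest
  induction rest with
  | nil =>
    intro i hdrop _ k hk1 hk2
    have : lines.length ≤ i := by
      by_contra hni
      have := congrArg List.length hdrop
      simp [List.length_drop] at this; omega
    omega
  | cons line rest ih =>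
    intro i hdrop h k hk1 hk2
    have hdrop' : rest = lines.drop (i + 1) := by
      have := congrArg List.tail hdrop
      simpa [List.tail_drop] using this
    have hline : line = lines.getD i "" := by
      have := congrArg (fun l => l.getD 0 "") hdrop
      simpa [List.getD, List.getElem?_drop] using this
    rw [pvFwd] at h
    by_cases hc : pvFwdCond lines i line = true
    · rw [if_pos hc] at h; exact absurd h (by simp)
    · rw [if_neg hc] at h
      rcases eq_or_lt_of_le hk1 with rfl | hlt
      · rw [← pv_fwdCond_eq, ← hline]; exact Bool.not_eq_true _ ▸ (by simpa using hc)
      · exact ih (i + 1) hdrop' h k (by omega) hk2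

-- pvCond unfolded to an existential over marker indices
lemma pv_cond_iff (lines : List String) (i : Nat) :
    pvCond lines i = true ↔
      pvB_starts lines i = true ∧
      ∃ m, i ≤ m ∧ m < i + 10 ∧ m < lines.length ∧ pvB_marker (lines.getD m "") = true := by
  simp only [pvCond, Bool.and_eq_true, List.any_eq_true]
  constructor
  · rintro ⟨hs, x, hx, hm⟩
    refine ⟨hs, ?_⟩
    obtain ⟨j, hj, rfl⟩ := List.mem_iff_getElem.1 hx
    have hjlen := hj
    simp only [List.length_take, List.length_drop] at hjlen
    refine ⟨i + j, by omega, by omega, by omega, ?_⟩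
    have : ((lines.drop i).take 10)[j] = lines[i + j]'(by omega) := by
      rw [List.getElem_take, List.getElem_drop]
    rw [this] at hm
    simpa [List.getD, List.getElem?_eq_getElem (by omega : i + j < lines.length)] using hm
  · rintro ⟨hs, m, h1, h2, h3, hm⟩
    refine ⟨hs, ?_⟩
    have hj : m - i < ((lines.drop i).take 10).length := by
      simp only [List.length_take, List.length_drop]; omega
    refine ⟨((lines.drop i).take 10)[m - i], List.getElem_mem hj, ?_⟩
    have : ((lines.drop i).take 10)[m - i] = lines[i + (m - i)]'(by omega) := by
      rw [List.getElem_take, List.getElem_drop]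
    rw [this]
    have hmi : i + (m - i) = m := by omega
    simpa [hmi, List.getD, List.getElem?_eq_getElem h3] using hm

-- characterization of the inner backward-window scan over an index range
lemma pv_back_some (lines : List String) :
    ∀ (len a : Nat) (i : Nat), pvB_back lines (List.range' a len) = some i →
      a ≤ i ∧ i < a + len ∧ pvB_starts lines i = true ∧
      ∀ k, a ≤ k → k < i → pvB_starts lines k = false := by
  intro len
  induction len with
  | zero => intro a i h; exact absurd h (by simp [pvB_back])
  | succ len ih =>
    intro a i h
    rw [List.range'_succ, pvB_back] at h
    by_cases hs : pvB_starts lines a = true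
    · rw [if_pos hs] at h
      obtain rfl : a = i := by injection h
      exact ⟨le_refl _, by omega, hs, fun k hk1 hk2 => by omega⟩
    · rw [if_neg hs] at h
      obtain ⟨h1, h2, h3, h4⟩ := ih (a + 1) i h
      refine ⟨by omega, by omega, h3, fun k hk1 hk2 => ?_⟩
      rcases eq_or_lt_of_le hk1 with rfl | hlt
      · simpa using hs
      · exact h4 k (by omega) hk2

lemma pv_back_none (lines : List String) :
    ∀ (len a : Nat), pvB_back lines (List.range' a len) = none →
      ∀ k, a ≤ k → k < a + len → pvB_starts lines k = false := by
  intro len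
  induction len with
  | zero => intro a _ k hk1 hk2; omega
  | succ len ih =>
    intro a h k hk1 hk2
    rw [List.range'_succ, pvB_back] at h
    by_cases hs : pvB_starts lines a = true
    · rw [if_pos hs] at h; exact absurd h (by simp)
    · rw [if_neg hs] at h
      rcases eq_or_lt_of_le hk1 with rfl | hlt
      · simpa using hs
      · exact ih (a + 1) h k (by omega) (by omega)

-- invariant of B's outer fold: after processing markers < M, best is n or a pvCond index,
-- and best is ≤ every start reachable from a processed marker's window
def pvInv (lines : List String) (M best : Nat) : Prop :=
  (best = lines.length ∨ (best < lines.length ∧ pvCond lines best = true)) ∧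
  (∀ i m, m < M → pvB_marker (lines.getD m "") = true → m - 9 ≤ i → i ≤ m →
    pvB_starts lines i = true → best ≤ i)

lemma pv_best_inv (lines : List String) :
    ∀ M, M ≤ lines.length →
      pvInv lines M ((List.range M).foldl (pvB_step lines) lines.length) := by
  intro M
  induction M with
  | zero =>
    intro _
    exact ⟨Or.inl (by simp), fun i m hm => by omega⟩
  | succ M ih =>
    intro hM
    obtain ⟨inv1, inv2⟩ := ih (by omega)
    rw [List.range_succ, List.foldl_append, List.foldl_cons, List.foldl_nil]
    set best := (List.range M).foldl (pvB_step lines) lines.length with hbest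
    rw [pvB_step]
    by_cases hmk : pvB_marker (lines.getD M "") = true
    · rw [if_pos hmk]
      cases hbk : pvB_back lines (pvB_window M) with
      | none =>
        refine ⟨inv1, fun i m hm hmark h1 h2 hst => ?_⟩
        rcases Nat.lt_succ_iff_lt_or_eq.1 hm with hlt | rfl
        · exact inv2 i m hlt hmark h1 h2 hst
        · exact absurd hst (by
            simp only [Bool.not_eq_true]
            exact pv_back_none lines _ _ hbk i h1 (by omega))
      | some i0 =>
        obtain ⟨hb1, hb2, hb3, hb4⟩ := pv_back_some lines _ _ _ hbk
        show pvInv lines (M + 1) (if i0 < best then i0 else best)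
        have hi0M : i0 ≤ M := by omega
        have hi0n : i0 < lines.length := by omega
        have hcond : pvCond lines i0 = true := by
          rw [pv_cond_iff]
          exact ⟨hb3, M, hi0M, by omega, by omega, hmk⟩
        by_cases hlt : i0 < best
        · rw [if_pos hlt]
          refine ⟨Or.inr ⟨hi0n, hcond⟩, fun i m hm hmark h1 h2 hst => ?_⟩
          rcases Nat.lt_succ_iff_lt_or_eq.1 hm with hl | rfl
          · exact le_trans (le_of_lt hlt) (inv2 i m hl hmark h1 h2 hst)
          · by_contra hni
            exact absurd hst (by simp only [Bool.not_eq_true]; exact hb4 i (by omega) (by omega))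
        · rw [if_neg hlt]
          refine ⟨inv1, fun i m hm hmark h1 h2 hst => ?_⟩
          rcases Nat.lt_succ_iff_lt_or_eq.1 hm with hl | rfl
          · exact inv2 i m hl hmark h1 h2 hst
          · have : i0 ≤ i := by
              by_contra hni
              exact absurd hst (by simp only [Bool.not_eq_true]; exact hb4 i (by omega) (by omega))
            omega
    · rw [if_neg hmk]
      refine ⟨inv1, fun i m hm hmark h1 h2 hst => ?_⟩
      rcases Nat.lt_succ_iff_lt_or_eq.1 hm with hl | rfl
      · exact inv2 i m hl hmark h1 h2 hst
      · exact absurd hmark (by simpa using hmk)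

-- from the invariant at M = n: best ≤ every pvCond index, and best itself is n or a pvCond index
lemma pv_best_le (lines : List String) (i : Nat) (hc : pvCond lines i = true) :
    pvB_best lines ≤ i := by
  obtain ⟨_, inv2⟩ := pv_best_inv lines lines.length (le_refl _)
  obtain ⟨hs, m, h1, h2, h3, hm⟩ := (pv_cond_iff lines i).1 hc
  exact inv2 i m h3 hm (by omega) h1 hs

lemma pv_best_spec (lines : List String) :
    pvB_best lines = lines.length ∨
      (pvB_best lines < lines.length ∧ pvCond lines (pvB_best lines) = true) :=
  (pv_best_inv lines lines.length (le_refl _)).1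

-- the end scan over range' equals findIdx? on the dropped list
lemma pv_endScan_eq (lines : List String) (s : Nat) :
    ∀ (rest : List String) (b : Nat), rest = lines.drop b →
      pvB_endScan lines s (List.range' b rest.length) =
        (match rest.findIdx? pvEnd with
         | some k => ((s : Int), ((b + k : Nat) : Int))
         | none => (-1, -1)) := by
  intro rest
  induction rest with
  | nil => intro b _; rfl
  | cons line rest ih =>
    intro b hdrop
    have hdrop' : rest = lines.drop (b + 1) := by
      have := congrArg List.tail hdrop
      simpa [List.tail_drop] using this
    have hline : line = lines.getD b "" := by
      have := congrArg (fun l => l.getD 0 "") hdrop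
      simpa [List.getD, List.getElem?_drop] using this
    rw [List.length_cons, List.range'_succ, pvB_endScan, List.findIdx?_cons, ← hline]
    by_cases he : pvEnd line = true
    · rw [if_pos (by simpa [pvEnd] using he), if_pos he]
      simp
    · rw [if_neg (by simpa [pvEnd] using he), if_neg (by simpa using he),
        ih (b + 1) hdrop']
      cases hk : rest.findIdx? pvEnd with
      | none => simp
      | some k =>
        simp only [Option.map_some]
        refine congrArg (Prod.mk (s : Int)) ?_
        push_cast
        omega

-- ===== VERDICT (by name: the statement is the Claim_ definition above) =====
theorem find_vulnerability_header_block_spec : Claim_equal_find_vulnerability_header_block := by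
  intro lines _
  show find_vulnerability_header_block lines = find_vulnerability_header_block_alt lines
  rw [find_vulnerability_header_block, find_vulnerability_header_block_alt,
    pv_loopA_false lines lines 0 (by simp)]
  show _ = (if pvB_best lines = lines.length then ((-1 : Int), (-1 : Int))
    else pvB_endScan lines (pvB_best lines) (List.range' (pvB_best lines) (lines.length - pvB_best lines)))
  cases hf : pvFwd lines lines 0 with
  | none =>
    have hall := pv_fwd_none lines lines 0 (by simp) hf
    have hbn : pvB_best lines = lines.length := by
      rcases pv_best_spec lines with h | ⟨h1, h2⟩
      · exact h
      · exact absurd h2 (by simp [hall (pvB_best lines) (by omega) h1])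
    rw [if_pos hbn]
  | some s =>
    obtain ⟨_, hsn, hcs, hleast⟩ := pv_fwd_some lines lines 0 (by simp) s hf
    have hbs : pvB_best lines = s := by
      have h1 := pv_best_le lines s hcs
      rcases pv_best_spec lines with h | ⟨hb1, hb2⟩
      · omega
      · have := hleast (pvB_best lines) (by omega)
        by_contra hne
        have hlt : pvB_best lines < s := by omega
        exact absurd hb2 (by simp [this hlt])
    rw [hbs, if_neg (by omega)]
    have hlen : (lines.drop s).length = lines.length - s := by simp
    rw [← hlen, pv_endScan_eq lines s (lines.drop s) s rfl]
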